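-- pv_equiv track=rewrite | github.com/Glorioso-Tv/apiresolver | dailymotion.py | pick_source
-- ===== SOURCE A (Python) =====
-- def pick_source(sources):
--     if len(sources) > 1 or len(sources) == 1:
--         q1080p = []
--         q720p = []
--         q480p = []
--         q380p = []
--         q240p = []
--         for quality, url in sources:
--             #if quality == '1080':
--             #    q1080p.append((quality,url))
--             if quality == '720':
--                 q720p.append((quality,url))
--             elif quality == '480':
--                 q480p.append((quality,url))
--             elif quality == '380':
--                 q380p.append((quality,url))
--             elif quality == '240':
--                 q240p.append((quality,url))
--         if q1080p:
--             stream = q1080p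
--         elif q720p:
--             stream = q720p
--         elif q480p:
--             stream = q480p
--         elif q380p:
--             stream = q380p
--         elif q240p:
--             stream = q240p
--         else:
--             stream = []
--         if stream:
--             result = stream[0][1]
--         else:
--             result = ''
--     else:
--         result = ''
--     return result
-- ===== SOURCE B (Python) =====
-- def pick_source(sources):
--     for target in ('720', '480', '380', '240'):
--         for quality, url in sources:
--             if quality == target:
--                 return url
--     return ''
-- ===== Notes on version B (the rewrite author's own statement) =====
-- stated objective: simpler
-- what changed: Replaces A's five accumulator buckets and post-hoc bucket selection with a priority-driven nested scan over ('720','480','380','240') that returns the first matching url immediately.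
import Mathlib
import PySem

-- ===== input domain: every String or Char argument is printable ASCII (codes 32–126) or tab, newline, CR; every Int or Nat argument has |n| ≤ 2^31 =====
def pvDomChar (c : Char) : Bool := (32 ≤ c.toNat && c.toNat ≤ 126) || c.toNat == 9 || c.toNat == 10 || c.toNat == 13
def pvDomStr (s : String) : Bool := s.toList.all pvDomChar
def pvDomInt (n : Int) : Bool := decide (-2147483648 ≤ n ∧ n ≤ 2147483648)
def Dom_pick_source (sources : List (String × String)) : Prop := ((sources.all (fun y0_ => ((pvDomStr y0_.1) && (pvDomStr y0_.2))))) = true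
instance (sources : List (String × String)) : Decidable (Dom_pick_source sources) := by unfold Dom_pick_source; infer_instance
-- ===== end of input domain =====

-- B replaces A's five accumulator buckets + post-hoc selection with a priority-driven
-- nested scan that returns the first matching url immediately (objective: simpler).


-- ===== PORT A =====
-- state: (q1080p, q720p, q480p, q380p, q240p); the 1080 branch is commented out in A
def pickStep (acc : List (String × String) × List (String × String) × List (String × String) × List (String × String) × List (String × String))
    (qu : String × String) :
    List (String × String) × List (String × String) × List (String × String) × List (String × String) × List (String × String) :=
  let (q1080, q720, q480, q380, q240) := acc
  if qu.1 == "720" then (q1080, q720 ++ [qu], q480, q380, q240)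
  else if qu.1 == "480" then (q1080, q720, q480 ++ [qu], q380, q240)
  else if qu.1 == "380" then (q1080, q720, q480, q380 ++ [qu], q240)
  else if qu.1 == "240" then (q1080, q720, q480, q380, q240 ++ [qu])
  else acc

def pick_source (sources : List (String × String)) : String :=
  if sources.length > 1 ∨ sources.length = 1 then
    let st := sources.foldl pickStep ([], [], [], [], [])
    let (q1080, q720, q480, q380, q240) := st
    let stream :=
      if q1080 ≠ [] then q1080
      else if q720 ≠ [] then q720
      else if q480 ≠ [] then q480
      else if q380 ≠ [] then q380
      else if q240 ≠ [] then q240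
      else []
    match stream with
    | qu :: _ => qu.2
    | [] => ""
  else ""

-- ===== PORT B =====
-- inner loop of B: scan sources for the first pair whose quality equals the target
def findQ (t : String) : List (String × String) → Option String
  | [] => none
  | (q, u) :: rest => if q == t then some u else findQ t rest

-- outer loop of B over the priority list
def pickGo (sources : List (String × String)) : List String → String
  | [] => ""
  | t :: ts =>
    match findQ t sources with
    | some u => u
    | none => pickGo sources ts

def pick_source_alt (sources : List (String × String)) : String :=
  pickGo sources ["720", "480", "380", "240"]

-- ===== PRECONDITION & SPEC =====
def Spec_pick_source (sources : List (String × String)) (out : String) : Prop := out = pick_source_alt sources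
instance (sources : List (String × String)) (out : String) : Decidable (Spec_pick_source sources out) := by unfold Spec_pick_source; infer_instance

-- ===== CLAIM (what is proved, stated in full; the proofs are below) =====
def Claim_equal_pick_source : Prop := ∀ (sources : List (String × String)), Dom_pick_source sources → Spec_pick_source sources (pick_source sources)

-- ===== LEMMAS AND PROOFS =====

def bucket (t : String) (xs : List (String × String)) : List (String × String) :=
  xs.filter (fun p => p.1 == t)

theorem foldl_pickStep_eq (xs : List (String × String))
    (a b c d e : List (String × String)) :
    xs.foldl pickStep (a, b, c, d, e) =
      (a, b ++ bucket "720" xs, c ++ bucket "480" xs, d ++ bucket "380" xs, e ++ bucket "240" xs) := by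
  induction xs generalizing a b c d e with
  | nil => simp [bucket]
  | cons x xs ih =>
    simp only [List.foldl_cons, pickStep, bucket, List.filter_cons]
    split_ifs with h1 h2 h3 h4 <;>
      simp_all [bucket, List.append_assoc]

theorem findQ_eq (t : String) (xs : List (String × String)) :
    findQ t xs = (bucket t xs).head?.map Prod.snd := by
  induction xs with
  | nil => simp [findQ, bucket]
  | cons x xs ih =>
    obtain ⟨q, u⟩ := x
    by_cases h : q == t <;> simp [findQ, bucket, h] <;> simpa [bucket] using ih

-- ===== VERDICT (by name: the statement is the Claim_ definition above) =====
theorem pick_source_spec : Claim_equal_pick_source := by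
  intro sources _
  unfold Spec_pick_source pick_source pick_source_alt
  cases hs : sources with
  | nil => simp [pickGo, findQ]
  | cons x xs =>
    have hlen : ((x :: xs).length > 1 ∨ (x :: xs).length = 1) := by
      cases xs <;> simp
    rw [if_pos hlen, foldl_pickStep_eq]
    rcases h7 : bucket "720" (x :: xs) with _ | ⟨p, _⟩ <;>
    rcases h4 : bucket "480" (x :: xs) with _ | ⟨p4, _⟩ <;>
    rcases h3 : bucket "380" (x :: xs) with _ | ⟨p3, _⟩ <;>
    rcases h2 : bucket "240" (x :: xs) with _ | ⟨p2, _⟩ <;>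
      simp [pickGo, findQ_eq, h7, h4, h3, h2]
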